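-- pv_equiv track=rewrite | github.com/rhehd721/programmers_algorithm | Heap_scoville/main.py | solution
-- ===== SOURCE A (Python) =====
-- def solution(scoville, K):
--     Check = 0
--     scoville.sort()
--
--     if (scoville[0] == 0):
--         scoville.remove(0)
--         if (scoville[0] >= K):
--             return 1
--     elif (scoville[0] >= K):
--         return 0
--
--     while (len(scoville) >= 2):
--         # 제일작은 두개로 작업해라
--         scoville[1] = scoville[0] + (scoville[1] * 2)
--         del scoville[0]
--         # 섞은회수 증가!
--         Check += 1
--
--         # 정렬해라
--         scoville.sort()
--
--         # 섞은다음부터 커지게되면 종료해라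
--         if (scoville[0] >= K):
--             break
--         # 더이상 더할 두개가 없어졌다면
--         elif (len(scoville) == 1):
--             Check = 0
--             break
--
--     if(Check == 0):
--         answer = -1
--     else:
--         answer = Check
--     return answer
-- ===== SOURCE B (Python) =====
-- def solution(scoville, K):
--     q1 = sorted(scoville)   # original values, consumed from the front
--     q2 = []                 # mixed values, appended at the back, consumed from the front
--     i = 0
--     j = 0
--     count = 0
--     while True:
--         remaining = (len(q1) - i) + (len(q2) - j)
--         if remaining == 0:
--             return -1
--         if i < len(q1) and (j >= len(q2) or q1[i] <= q2[j]):
--             smallest = q1[i]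
--         else:
--             smallest = q2[j]
--         if smallest >= K:
--             return count
--         if remaining == 1:
--             return -1
--         if i < len(q1) and (j >= len(q2) or q1[i] <= q2[j]):
--             a = q1[i]; i += 1
--         else:
--             a = q2[j]; j += 1
--         if i < len(q1) and (j >= len(q2) or q1[i] <= q2[j]):
--             b = q1[i]; i += 1
--         else:
--             b = q2[j]; j += 1
--         q2.append(a + 2 * b)
--         count += 1
-- ===== Notes on version B (the rewrite author's own statement) =====
-- stated objective: faster
-- what changed: A re-sorts the whole list after every mix (and special-cases a leading 0 by deleting it for free); B sorts once and then runs the classic two-FIFO-queue greedy (originals queue + mixed-values queue, each mix is O(1) pops/append), with no zero special case.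
-- intended difference: On lists whose minimum is 0 (a 0 present, all elements nonnegative) A discards one 0 without counting a mix, so when K <= 0 or the second-smallest element is < K it returns a count that is too small, 1, or -1 (e.g. [0,3], K=5 gives -1) where B returns the true minimal number of mixes (1 there), which is what the problem asks for. — e.g. on solution([0, 3], 5): A returns -1, B returns 1
import Mathlib
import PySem

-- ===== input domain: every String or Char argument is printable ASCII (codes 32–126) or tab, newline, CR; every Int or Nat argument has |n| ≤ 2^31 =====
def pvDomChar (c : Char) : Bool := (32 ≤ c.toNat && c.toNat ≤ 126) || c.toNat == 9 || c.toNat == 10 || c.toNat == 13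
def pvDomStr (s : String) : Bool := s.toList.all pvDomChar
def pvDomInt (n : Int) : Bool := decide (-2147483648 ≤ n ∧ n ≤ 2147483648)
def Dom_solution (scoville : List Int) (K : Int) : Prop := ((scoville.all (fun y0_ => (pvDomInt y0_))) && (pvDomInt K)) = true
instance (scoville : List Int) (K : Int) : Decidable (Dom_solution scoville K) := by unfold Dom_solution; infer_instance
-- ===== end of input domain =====

-- B sorts once and runs the two-FIFO-queue greedy instead of re-sorting after every mix, and drops A's
-- delete-a-leading-0-for-free step; return-value equivalence only: Python A sorts and pops its argument
-- in place, B does not mutate it.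

-- ===== PORT A =====
-- A's while loop: state = the current list and Check; each pass mixes the two smallest,
-- deletes the first, re-sorts, then tests scoville[0] >= K and len == 1; the trailing
-- 'if Check == 0: answer = -1' of A is applied at each exit.
def aloop (K : Int) (s : List Int) (check : Int) : Int :=
  match s with
  | a :: b :: rest =>
    let s' := PySem.List.sorted ((a + b * 2) :: rest) (fun x => x) false
    let check' := check + 1
    if K ≤ (PySem.List.pyGet? s' 0).getD 0 then (if check' = 0 then -1 else check')
    else if s'.length = 1 then -1
    else aloop K s' check'
  | _ => if check = 0 then -1 else check
termination_by s.length
decreasing_by simp [PySem.List.length_sorted]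

def solution (scoville : List Int) (K : Int) : Int :=
  let s := PySem.List.sorted scoville (fun x => x) false
  let h0 := (PySem.List.pyGet? s 0).getD 0        -- scoville[0]; the IndexError on [] is outside Pre_solution
  if h0 = 0 then
    let s2 := (PySem.List.remove? s 0).getD []    -- scoville.remove(0)
    let h1 := (PySem.List.pyGet? s2 0).getD 0     -- scoville[0]; the IndexError on [0] is outside Pre_solution
    if K ≤ h1 then 1 else aloop K s2 0
  else if K ≤ h0 then 0
  else aloop K s 0

-- ===== PORT B =====
-- python's "if i < len(q1) and (j >= len(q2) or q1[i] <= q2[j])": take the smaller front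
def popMin (q1 q2 : List Int) : Int × List Int × List Int :=
  match q1, q2 with
  | x :: t, y :: u => if x ≤ y then (x, t, y :: u) else (y, x :: t, u)
  | x :: t, [] => (x, t, [])
  | [], y :: u => (y, [], u)
  | [], [] => (0, [], [])   -- unreachable: both callers check nonemptiness first

theorem popMin_len (q1 q2 : List Int) (h : ¬ q1.length + q2.length = 0) :
    (popMin q1 q2).2.1.length + (popMin q1 q2).2.2.length + 1 = q1.length + q2.length := by
  match q1, q2 with
  | [], [] => simp at h
  | x :: t, [] => simp [popMin]
  | [], y :: u => simp [popMin]
  | x :: t, y :: u => simp only [popMin]; split <;> simp <;> omega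

-- the 'while True' loop over (the rest of q1, the rest of q2, count)
def bloop (K : Int) (q1 q2 : List Int) (count : Int) : Int :=
  if h0 : q1.length + q2.length = 0 then -1
  else
    if K ≤ (popMin q1 q2).1 then count
    else if h1 : q1.length + q2.length = 1 then -1
    else
      bloop K (popMin (popMin q1 q2).2.1 (popMin q1 q2).2.2).2.1
        ((popMin (popMin q1 q2).2.1 (popMin q1 q2).2.2).2.2 ++
          [(popMin q1 q2).1 + 2 * (popMin (popMin q1 q2).2.1 (popMin q1 q2).2.2).1])
        (count + 1)
termination_by q1.length + q2.length
decreasing_by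
  have h2 := popMin_len q1 q2 h0
  have h3 := popMin_len (popMin q1 q2).2.1 (popMin q1 q2).2.2 (by omega)
  simp only [List.length_append, List.length_cons, List.length_nil]
  omega

def solution_alt (scoville : List Int) (K : Int) : Int :=
  bloop K (PySem.List.sorted scoville (fun x => x) false) [] 0

-- ===== PRECONDITION & SPEC =====
-- Pre_ excludes exactly the inputs where A raises IndexError: the empty list, and [0]
-- (there, after scoville.remove(0), scoville[0] raises).
def Pre_solution (scoville : List Int) (K : Int) : Prop := scoville ≠ [] ∧ scoville ≠ [0]
instance (scoville : List Int) (K : Int) : Decidable (Pre_solution scoville K) := by unfold Pre_solution; infer_instance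
def pvWitness_solution : List Int × Int := ([1, 2, 9], 10)

-- On lists whose minimum is 0 (a 0 present, all elements nonnegative) A discards one 0 without counting
-- a mix, so when K ≤ 0 or the second-smallest element is < K it returns a count that is too small, 1,
-- or -1, where B returns the true minimal number of mixes, which is what the problem asks for.
def D_solution (scoville : List Int) (K : Int) : Prop :=
  0 ∈ scoville ∧ (∀ x ∈ scoville, 0 ≤ x) ∧ 2 ≤ scoville.length ∧
    (K ≤ 0 ∨ (PySem.List.sorted scoville (fun x => x) false).getD 1 0 < K)
instance (scoville : List Int) (K : Int) : Decidable (D_solution scoville K) := by unfold D_solution; infer_instance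

def Spec_solution (scoville : List Int) (K : Int) (out : Int) : Prop :=
  ¬ D_solution scoville K → out = solution_alt scoville K
instance (scoville : List Int) (K : Int) (out : Int) : Decidable (Spec_solution scoville K out) := by unfold Spec_solution; infer_instance

def pvDiffWitness_solution : List Int × Int := ([0, 3], 5)
def pvDiffWitnessOut_solution : Int × Int := (-1, 1)

-- ===== CLAIM (what is proved, stated in full; the proofs are below) =====
def Claim_unchanged_solution : Prop := ∀ (scoville : List Int) (K : Int), Dom_solution scoville K → Pre_solution scoville K → Spec_solution scoville K (solution scoville K)
def Claim_changed_solution : Prop := Dom_solution (pvDiffWitness_solution.1) (pvDiffWitness_solution.2) ∧ Pre_solution (pvDiffWitness_solution.1) (pvDiffWitness_solution.2) ∧ D_solution (pvDiffWitness_solution.1) (pvDiffWitness_solution.2) ∧ solution (pvDiffWitness_solution.1) (pvDiffWitness_solution.2) = pvDiffWitnessOut_solution.1 ∧ solution_alt (pvDiffWitness_solution.1) (pvDiffWitness_solution.2) = pvDiffWitnessOut_solution.2 ∧ pvDiffWitnessOut_solution.1 ≠ pvDiffWitnessOut_solution.2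

-- ===== LEMMAS AND PROOFS =====

-- the common greedy both loops implement, phrased on the sorted state list
def gg (K : Int) (s : List Int) (c : Int) : Int :=
  match s with
  | [] => -1
  | [a] => if K ≤ a then c else -1
  | a :: b :: rest => if K ≤ a then c else gg K (List.orderedInsert (· ≤ ·) (a + b * 2) rest) (c + 1)
termination_by s.length
decreasing_by simp [List.orderedInsert_length]

theorem gg_nil (K c : Int) : gg K [] c = -1 := by rw [gg]
theorem gg_single (K a c : Int) : gg K [a] c = if K ≤ a then c else -1 := by rw [gg]
theorem gg_cons (K a b c : Int) (rest : List Int) :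
    gg K (a :: b :: rest) c = if K ≤ a then c else gg K (List.orderedInsert (· ≤ ·) (a + b * 2) rest) (c + 1) := by
  rw [gg]

theorem gg_stop (K c : Int) (s : List Int) (hne : s ≠ []) (h : ∀ x ∈ s, K ≤ x) : gg K s c = c := by
  match s with
  | [a] => rw [gg_single, if_pos (h a (by simp))]
  | a :: b :: rest => rw [gg_cons, if_pos (h a (by simp))]

theorem aloop_one (K a c : Int) : aloop K [a] c = if c = 0 then -1 else c := by simp [aloop]

theorem aloop_cons (K a b c : Int) (rest : List Int) :
    aloop K (a :: b :: rest) c =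
      if K ≤ (PySem.List.pyGet? (PySem.List.sorted ((a + b * 2) :: rest) (fun x => x) false) 0).getD 0
      then (if c + 1 = 0 then -1 else c + 1)
      else if (PySem.List.sorted ((a + b * 2) :: rest) (fun x => x) false).length = 1 then -1
      else aloop K (PySem.List.sorted ((a + b * 2) :: rest) (fun x => x) false) (c + 1) := by
  rw [aloop]

theorem sorted_cons_eq_orderedInsert (m : Int) (rest : List Int) (h : rest.Pairwise (· ≤ ·)) :
    PySem.List.sorted (m :: rest) (fun x => x) false = List.orderedInsert (· ≤ ·) m rest :=
  PySem.List.sorted_id_eq_of_perm_of_pairwise _ _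
    (List.perm_orderedInsert _ _ _) (List.Pairwise.orderedInsert _ _ h)

theorem orderedInsert_ne_nil (m : Int) (rest : List Int) :
    List.orderedInsert (· ≤ ·) m rest ≠ [] := by
  intro h
  have := List.orderedInsert_length (· ≤ ·) rest m
  rw [h] at this; simp at this

-- ===== the A side: aloop is gg =====
theorem aloop_eq_gg (K : Int) (n : Nat) : ∀ (s : List Int) (c : Int), s.length ≤ n →
    s.Pairwise (· ≤ ·) → 2 ≤ s.length → ¬ K ≤ s.headD 0 → 0 ≤ c →
    aloop K s c = gg K s c := by
  induction n with
  | zero => intro s c h1 _ h2 _ _; omega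
  | succ n ih =>
    intro s c hlen hpw hlen2 hhead hc
    match s, hlen2 with
    | a :: b :: rest, _ =>
      have hrest : rest.Pairwise (· ≤ ·) := (List.pairwise_cons.1 (List.pairwise_cons.1 hpw).2).2
      have hKa : ¬ K ≤ a := by simpa using hhead
      have hpw' : (List.orderedInsert (· ≤ ·) (a + b * 2) rest).Pairwise (· ≤ ·) :=
        List.Pairwise.orderedInsert _ _ hrest
      have hlen' : (List.orderedInsert (· ≤ ·) (a + b * 2) rest).length = rest.length + 1 := by
        simp [List.orderedInsert_length]
      rcases hins' : List.orderedInsert (· ≤ ·) (a + b * 2) rest with - | ⟨m, t0⟩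
      · exact absurd hins' (orderedInsert_ne_nil _ _)
      · have hS : PySem.List.sorted ((a + b * 2) :: rest) (fun x => x) false = m :: t0 :=
          (sorted_cons_eq_orderedInsert (a + b * 2) rest hrest).trans hins'
        rw [gg_cons, if_neg hKa, hins']
        rcases t0 with - | ⟨y, t⟩
        · -- one element left after the mix
          rw [aloop_cons, hS]
          simp only [PySem.List.pyGet?_zero_cons, Option.getD_some,
            List.length_cons, List.length_nil, gg_single]
          split
          · rw [if_neg (by omega)]
          · simp
        · -- still at least two elements
          rw [hins'] at hpw' hlen'
          rw [aloop_cons, hS]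
          simp only [PySem.List.pyGet?_zero_cons, Option.getD_some, List.length_cons]
          by_cases hKm : K ≤ m
          · rw [if_pos hKm, if_neg (by omega), gg_cons, if_pos hKm]
          · rw [if_neg hKm, if_neg (by omega)]
            apply ih (m :: y :: t) (c + 1)
            · simp only [List.length_cons] at hlen ⊢
              simp only [List.length_cons] at hlen'
              omega
            · exact hpw'
            · simp
            · simpa using hKm
            · omega

-- ===== the B side: popMin pops the minimum of the merged queues =====
theorem popMin_spec (q1 q2 : List Int) (a : Int) (rest : List Int)
    (hq1 : q1.Pairwise (· ≤ ·)) (hq2 : q2.Pairwise (· ≤ ·))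
    (hperm : (q1 ++ q2).Perm (a :: rest)) (hmin : ∀ y ∈ rest, a ≤ y) :
    (popMin q1 q2).1 = a ∧
    ((popMin q1 q2).2.1 ++ (popMin q1 q2).2.2).Perm rest ∧
    (popMin q1 q2).2.1.Pairwise (· ≤ ·) ∧ (popMin q1 q2).2.2.Pairwise (· ≤ ·) ∧
    (∀ x ∈ (popMin q1 q2).2.2, x ∈ q2) := by
  have hmem : ∀ y ∈ q1 ++ q2, a ≤ y := by
    intro y hy
    rcases List.mem_cons.1 (hperm.mem_iff.1 hy) with h | h
    · omega
    · exact hmin y h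
  match q1, q2 with
  | [], [] =>
    exfalso
    have : a ∈ ([] : List Int) ++ [] := hperm.symm.mem_iff.1 (show a ∈ a :: rest by simp)
    simp at this
  | x :: t, [] =>
    have hax : a ≤ x := hmem x (by simp)
    have hxa : x = a := by
      have haq : a ∈ (x :: t) ++ ([] : List Int) := hperm.symm.mem_iff.1 (show a ∈ a :: rest by simp)
      simp only [List.append_nil] at haq
      rcases List.mem_cons.1 haq with h | h
      · omega
      · have := (List.pairwise_cons.1 hq1).1 a h; omega
    subst hxa
    have hpop : popMin (x :: t) [] = (x, t, []) := rfl
    rw [hpop]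
    refine ⟨rfl, ?_, (List.pairwise_cons.1 hq1).2, by simp, by simp⟩
    have h1 : (x :: t).Perm (x :: rest) := by simpa using hperm
    simpa using h1.cons_inv
  | [], y :: u =>
    have hay : a ≤ y := hmem y (by simp)
    have hya : y = a := by
      have haq : a ∈ ([] : List Int) ++ (y :: u) := hperm.symm.mem_iff.1 (show a ∈ a :: rest by simp)
      simp only [List.nil_append] at haq
      rcases List.mem_cons.1 haq with h | h
      · omega
      · have := (List.pairwise_cons.1 hq2).1 a h; omega
    subst hya
    have hpop : popMin [] (y :: u) = (y, [], u) := rfl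
    rw [hpop]
    refine ⟨rfl, ?_, by simp, (List.pairwise_cons.1 hq2).2, fun z hz => List.mem_cons_of_mem _ hz⟩
    have h1 : (y :: u).Perm (y :: rest) := by simpa using hperm
    simpa using h1.cons_inv
  | x :: t, y :: u =>
    have haq := hperm.symm.mem_iff.1 (show a ∈ a :: rest by simp)
    simp only [List.mem_append, List.mem_cons] at haq
    by_cases hxy : x ≤ y
    · have hax : a ≤ x := hmem x (by simp)
      have hxa : x = a := by
        rcases haq with (h | h) | (h | h)
        · omega
        · have := (List.pairwise_cons.1 hq1).1 a h; omega
        · omega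
        · have := (List.pairwise_cons.1 hq2).1 a h; omega
      subst hxa
      have hpop : popMin (x :: t) (y :: u) = (x, t, y :: u) := by simp [popMin, hxy]
      rw [hpop]
      refine ⟨rfl, ?_, (List.pairwise_cons.1 hq1).2, hq2, fun z hz => hz⟩
      have h1 : (x :: (t ++ y :: u)).Perm (x :: rest) := by simpa using hperm
      exact h1.cons_inv
    · have hay : a ≤ y := hmem y (by simp)
      have hya : y = a := by
        rcases haq with (h | h) | (h | h)
        · omega
        · have := (List.pairwise_cons.1 hq1).1 a h; omega
        · omega
        · have := (List.pairwise_cons.1 hq2).1 a h; omega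
      subst hya
      have hpop : popMin (x :: t) (y :: u) = (y, x :: t, u) := by simp [popMin, hxy]
      rw [hpop]
      refine ⟨rfl, ?_, hq1, (List.pairwise_cons.1 hq2).2, fun z hz => List.mem_cons_of_mem _ hz⟩
      have h1 : ((x :: t) ++ y :: u).Perm (y :: ((x :: t) ++ u)) := List.perm_middle
      exact (h1.symm.trans hperm).cons_inv

-- ===== the B side: bloop is gg, via the two-queue invariant =====
theorem bloop_eq_gg (K : Int) (n : Nat) : ∀ (s q1 q2 : List Int) (c : Int), s.length ≤ n →
    s.Pairwise (· ≤ ·) → q1.Pairwise (· ≤ ·) → q2.Pairwise (· ≤ ·) →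
    (q1 ++ q2).Perm s →
    (∀ x ∈ q2, ∀ a b rest, s = a :: b :: rest → b ≤ x → x ≤ a + b * 2) →
    bloop K q1 q2 c = gg K s c := by
  induction n with
  | zero =>
    intro s q1 q2 c hlen _ _ _ hperm _
    have hs : s = [] := List.eq_nil_of_length_eq_zero (by omega)
    subst hs
    have h0 : q1.length + q2.length = 0 := by have := hperm.length_eq; simpa using this
    rw [bloop, dif_pos h0, gg_nil]
  | succ n ih =>
    intro s q1 q2 c hlen hs hq1 hq2 hperm hbound
    match s with
    | [] =>
      have h0 : q1.length + q2.length = 0 := by have := hperm.length_eq; simpa using this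
      rw [bloop, dif_pos h0, gg_nil]
    | [a] =>
      have hlq : q1.length + q2.length = 1 := by
        have := hperm.length_eq; simpa using this
      obtain ⟨hp1, hp1perm, hp1q1, hp1q2, hp1sub⟩ :=
        popMin_spec q1 q2 a [] hq1 hq2 hperm (by simp)
      rw [bloop, dif_neg (by omega)]
      by_cases hKa : K ≤ a
      · rw [if_pos (by rw [hp1]; exact hKa), gg_single, if_pos hKa]
      · rw [if_neg (by rw [hp1]; exact hKa), dif_pos hlq, gg_single, if_neg hKa]
    | a :: b :: rest2 =>
      have hlq : q1.length + q2.length = rest2.length + 2 := by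
        have := hperm.length_eq; simp at this; omega
      have hmin : ∀ y ∈ b :: rest2, a ≤ y := (List.pairwise_cons.1 hs).1
      obtain ⟨hp1, hp1perm, hp1q1, hp1q2, hp1sub⟩ :=
        popMin_spec q1 q2 a (b :: rest2) hq1 hq2 hperm hmin
      rw [bloop, dif_neg (by omega)]
      by_cases hKa : K ≤ a
      · rw [if_pos (by rw [hp1]; exact hKa), gg_cons, if_pos hKa]
      · rw [if_neg (by rw [hp1]; exact hKa)]
        · rw [dif_neg (by omega)]
          have hmin2 : ∀ y ∈ rest2, b ≤ y :=
            (List.pairwise_cons.1 (List.pairwise_cons.1 hs).2).1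
          obtain ⟨hp2, hp2perm, hp2q1, hp2q2, hp2sub⟩ :=
            popMin_spec (popMin q1 q2).2.1 (popMin q1 q2).2.2 b rest2 hp1q1 hp1q2 hp1perm hmin2
          have hab : a ≤ b := (List.pairwise_cons.1 hs).1 b (by simp)
          have hrest2pw : rest2.Pairwise (· ≤ ·) :=
            (List.pairwise_cons.1 (List.pairwise_cons.1 hs).2).2
          -- every element remaining in the mixed queue is ≥ b and (by the invariant) ≤ a + b*2
          have hq2le : ∀ x ∈ (popMin (popMin q1 q2).2.1 (popMin q1 q2).2.2).2.2, x ≤ a + b * 2 := by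
            intro x hx
            have hxq2 : x ∈ q2 := hp1sub x (hp2sub x hx)
            have hxrest2 : x ∈ rest2 := hp2perm.mem_iff.1 (by simp [hx])
            exact hbound x hxq2 a b rest2 rfl (hmin2 x hxrest2)
          have harith : (popMin q1 q2).1 + 2 * (popMin (popMin q1 q2).2.1 (popMin q1 q2).2.2).1
              = a + b * 2 := by rw [hp1, hp2]; ring
          obtain ⟨m, hm⟩ : ∃ m, a + b * 2 = m := ⟨_, rfl⟩
          rw [hm] at harith hq2le
          rw [harith]
          set q1n := (popMin (popMin q1 q2).2.1 (popMin q1 q2).2.2).2.1 with hq1n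
          set q2n := (popMin (popMin q1 q2).2.1 (popMin q1 q2).2.2).2.2 with hq2n
          set sn := List.orderedInsert (· ≤ ·) m rest2 with hsn
          rw [gg_cons, if_neg hKa, hm]
          have hsnpw : sn.Pairwise (· ≤ ·) := List.Pairwise.orderedInsert _ _ hrest2pw
          have hperm_sn : sn.Perm (m :: rest2) := hsn ▸ List.perm_orderedInsert (· ≤ ·) m rest2
          apply ih sn q1n (q2n ++ [m]) (c + 1)
          · have : sn.length = rest2.length + 1 := by simp [hsn, List.orderedInsert_length]
            simp only [List.length_cons] at hlen
            omega
          · exact hsnpw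
          · exact hp2q1
          · rw [List.pairwise_append]
            exact ⟨hp2q2, by simp, by intro x hx y hy; simp at hy; subst hy; exact hq2le x hx⟩
          · refine List.Perm.trans ?_ hperm_sn.symm
            have h1 : (q1n ++ (q2n ++ [m])) = ((q1n ++ q2n) ++ [m]) := by
              rw [List.append_assoc]
            rw [h1]
            exact (hp2perm.append_right [m]).trans (List.perm_append_singleton m rest2)
          · -- the invariant for the new mixed queue
            intro x hx a' b' r' hsn' hb'x
            have hxm : x ≤ m := by
              rcases List.mem_append.1 hx with h | h
              · exact hq2le x h
              · simp at h; omega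
            have hmem_sn : ∀ y ∈ sn, y = m ∨ y ∈ rest2 := by
              intro y hy
              simpa using (List.mem_orderedInsert (· ≤ ·)).1 (hsn ▸ hy)
            have ha'mem : a' ∈ sn := by rw [hsn']; simp
            have hb'mem : b' ∈ sn := by rw [hsn']; simp
            by_cases hbm : b ≤ m
            · have hge : ∀ y ∈ sn, b ≤ y := by
                intro y hy
                rcases hmem_sn y hy with h | h
                · omega
                · exact hmin2 y h
              have h1 := hge a' ha'mem
              have h2 := hge b' hb'mem
              omega
            · -- m < b: then a' = b' = m, contradicting that m occurs once in sn
              rw [Int.not_le] at hbm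
              have hb'm : b' = m := by
                rcases hmem_sn b' hb'mem with h | h
                · exact h
                · have := hmin2 b' h; omega
              have ha'b' : a' ≤ b' := by
                have hpw2 := hsnpw
                rw [hsn'] at hpw2
                exact (List.pairwise_cons.1 hpw2).1 b' (by simp)
              have ha'm : a' = m := by
                rcases hmem_sn a' ha'mem with h | h
                · exact h
                · have := hmin2 a' h; omega
              exfalso
              rw [ha'm, hb'm] at hsn'
              have hc1 : sn.count m = 1 + rest2.count m := by
                rw [hperm_sn.count_eq m]; simp only [List.count_cons_self]; omega
              have hc0 : rest2.count m = 0 := by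
                rw [List.count_eq_zero]
                intro hmm
                have := hmin2 m hmm; omega
              have hc2 : 2 ≤ sn.count m := by
                rw [hsn']; simp only [List.count_cons_self]; omega
              omega

-- ===== assembling =====
theorem solution_alt_eq_gg (scoville : List Int) (K : Int) :
    solution_alt scoville K = gg K (PySem.List.sorted scoville (fun x => x) false) 0 := by
  apply bloop_eq_gg K (PySem.List.sorted scoville (fun x => x) false).length
  · exact le_rfl
  · simpa using PySem.List.sorted_pairwise scoville (fun x => x)
  · simpa using PySem.List.sorted_pairwise scoville (fun x => x)
  · simp
  · simp
  · simp

-- ===== VERDICT (by name: the statement is the Claim_ definition above) =====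
theorem solution_spec : Claim_unchanged_solution := by
  intro scoville K _ hpre hnd
  rw [solution_alt_eq_gg]
  rcases hse : PySem.List.sorted scoville (fun x => x) false with - | ⟨a, t⟩
  · exact absurd ((PySem.List.sorted_eq_nil_iff scoville (fun x => x) false).1 hse) hpre.1
  · have hspw : (a :: t).Pairwise (· ≤ ·) := by
      have := PySem.List.sorted_pairwise scoville (fun x => x)
      rw [hse] at this; simpa using this
    have htmin := (List.pairwise_cons.1 hspw).1
    have htpw := (List.pairwise_cons.1 hspw).2
    have hmemscov : ∀ x, x ∈ scoville ↔ x ∈ a :: t := by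
      intro x
      rw [← hse]
      exact (PySem.List.mem_sorted scoville (fun x => x) false x).symm
    simp only [solution, hse, PySem.List.pyGet?_zero_cons, Option.getD_some]
    by_cases ha : a = 0
    · subst ha
      rw [if_pos rfl, PySem.List.remove?_cons_self, Option.getD_some]
      rcases t with - | ⟨b, rest⟩
      · exfalso
        apply hpre.2
        have hp := (PySem.List.sorted_perm scoville (fun x => x) false).symm
        rw [hse] at hp
        exact List.perm_singleton.1 hp
      · have hb0 : (0:Int) ≤ b := htmin b (by simp)
        have hnd' : ¬ (K ≤ 0 ∨ (PySem.List.sorted scoville (fun x => x) false).getD 1 0 < K) := by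
          intro h
          refine hnd ⟨(hmemscov 0).2 (by simp), fun x hx => ?_, ?_, h⟩
          · rcases List.mem_cons.1 ((hmemscov x).1 hx) with h1 | h1
            · omega
            · have := htmin x h1; omega
          · have := PySem.List.length_sorted scoville (fun x => x) false
            rw [hse] at this; simp only [List.length_cons] at this; omega
        obtain ⟨hK0, hKb⟩ := not_or.1 hnd'
        rw [Int.not_le] at hK0
        rw [Int.not_lt] at hKb
        rw [hse] at hKb
        simp only [List.getD_cons_succ, List.getD_cons_zero] at hKb
        rw [PySem.List.pyGet?_zero_cons, Option.getD_some, if_pos hKb]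
        rw [gg_cons, if_neg (by omega)]
        have hstop : gg K (List.orderedInsert (· ≤ ·) (0 + b * 2) rest) (0 + 1) = 0 + 1 := by
          apply gg_stop
          · exact orderedInsert_ne_nil _ _
          · intro x hx
            rcases (List.mem_orderedInsert (· ≤ ·)).1 hx with h | h
            · omega
            · have := (List.pairwise_cons.1 htpw).1 x h; omega
        rw [hstop]
        norm_num
    · rw [if_neg ha]
      by_cases hKa : K ≤ a
      · rw [if_pos hKa, gg_stop K 0 (a :: t) (by simp)]
        intro x hx
        rcases List.mem_cons.1 hx with h | h
        · omega
        · have := htmin x h; omega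
      · rw [if_neg hKa]
        rcases t with - | ⟨b, rest⟩
        · rw [aloop_one, gg_single, if_neg hKa]; simp
        · exact aloop_eq_gg K (a :: b :: rest).length (a :: b :: rest) 0 le_rfl hspw (by simp)
            (by simpa using hKa) le_rfl

theorem solution_changed : Claim_changed_solution := by
  unfold Claim_changed_solution
  refine ⟨by decide, by decide, by decide, ?_, ?_, by decide⟩
  · show solution [0, 3] 5 = -1
    have hs : PySem.List.sorted ([0, 3] : List Int) (fun x => x) false = [0, 3] := by decide
    simp only [solution, hs, PySem.List.pyGet?_zero_cons, Option.getD_some,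
      PySem.List.remove?_cons_self]
    norm_num [aloop_one]
  · show solution_alt [0, 3] 5 = 1
    rw [solution_alt]
    norm_num [PySem.List.sorted, PySem.List.insertBy]
    rw [bloop]
    norm_num [popMin]
    rw [bloop]
    norm_num [popMin]
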